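-- pv_equiv track=rewrite | github.com/lighterEB/nullhubx | tools/nullclaw_config_catalog.py | is_scalar_type
-- ===== SOURCE A (Python) =====
-- def is_scalar_type(t: str, enums: dict[str, list[str]]) -> bool:
--     t = t.strip()
--     if t in enums:
--         return True
--     if t.startswith('?'):
--         return is_scalar_type(t[1:], enums)
--     if t.startswith('*'):
--         return is_scalar_type(t[1:], enums)
--     if t.startswith('[]const '):
--         inner = t[len('[]const '):].strip()
--         # list of primitives (or string)
--         if inner in enums:
--             return True
--         if inner.startswith('u8') or inner in {'u8', 'u16', 'u32', 'u64', 'i8', 'i16', 'i32', 'i64', 'f32', 'f64', 'bool', 'usize', 'isize'}: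
--             return True
--         # []const []const u8 etc considered scalar list leaf
--         if inner.startswith('[]const u8') or inner.startswith('?[]const u8'):
--             return True
--         return False
--
--     return t.startswith('u') or t.startswith('i') or t.startswith('f') or t in {
--         'bool',
--         'usize',
--         'isize',
--         '[]const u8',
--         '?[]const u8',
--     }
-- ===== SOURCE B (Python) =====
-- def is_scalar_type(t: str, enums: dict[str, list[str]]) -> bool:
--     t = t.strip()
--     while True:
--         if t in enums:
--             return True
--         if t.startswith('?') or t.startswith('*'):
--             t = t[1:].strip()
--         else:
--             break
--     if t.startswith('[]const '):
--         inner = t[len('[]const '):].strip()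
--         if inner in enums:
--             return True
--         if inner.startswith('u8') or inner in {'u8', 'u16', 'u32', 'u64', 'i8', 'i16', 'i32', 'i64', 'f32', 'f64', 'bool', 'usize', 'isize'}:
--             return True
--         if inner.startswith('[]const u8') or inner.startswith('?[]const u8'):
--             return True
--         return False
--     return t.startswith('u') or t.startswith('i') or t.startswith('f') or t in {'bool', 'usize', 'isize', '[]const u8', '?[]const u8'}
-- ===== Notes on version B (the rewrite author's own statement) =====
-- stated objective: simpler
-- what changed: The recursive prefix-peeling (each '?'/'*' strips one char via a recursive call) is rewritten as an iterative while-loop over a single mutable variable, with the final classification kept as a straight-line tail.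
import Mathlib
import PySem

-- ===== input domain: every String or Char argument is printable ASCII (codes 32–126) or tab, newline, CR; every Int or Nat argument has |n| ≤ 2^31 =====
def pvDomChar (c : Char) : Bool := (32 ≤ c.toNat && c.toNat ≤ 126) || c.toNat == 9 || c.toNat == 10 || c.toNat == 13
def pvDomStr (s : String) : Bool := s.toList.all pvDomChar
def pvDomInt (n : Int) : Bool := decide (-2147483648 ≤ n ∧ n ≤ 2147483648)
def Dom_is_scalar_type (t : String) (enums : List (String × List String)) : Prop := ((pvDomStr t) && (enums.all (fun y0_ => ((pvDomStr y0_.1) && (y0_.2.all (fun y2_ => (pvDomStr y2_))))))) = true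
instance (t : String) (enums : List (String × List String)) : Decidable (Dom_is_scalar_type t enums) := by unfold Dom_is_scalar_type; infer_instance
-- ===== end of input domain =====

-- B rewrites A's recursive '?'/'*' prefix-peeling as an iterative loop over one variable (objective: simpler).

-- shared literal tables ('t in enums' = dict-key membership; the two set literals of the Python)
def pvKeyMem (enums : List (String × List String)) (t : List Char) : Bool :=
  enums.any (fun p => p.1.toList == t)
def pvPrims : List String :=
  ["u8", "u16", "u32", "u64", "i8", "i16", "i32", "i64", "f32", "f64", "bool", "usize", "isize"]
def pvLeaves : List String :=
  ["bool", "usize", "isize", "[]const u8", "?[]const u8"]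

-- cited by the ports' decreasing_by
theorem pvStripLen (cs : List Char) : (PySem.Chars.strip cs).length ≤ cs.length := by
  simp [PySem.Chars.strip, PySem.Chars.lstrip, PySem.Chars.rstrip]
  exact le_trans (List.length_dropWhile_le _ _) (by simpa using List.length_dropWhile_le _ _)

-- ===== PORT A =====
-- A works on the string; the port works on its char list (PySem.Str.* are thin wrappers over PySem.Chars.*)
def pvCoreA (enums : List (String × List String)) (cs : List Char) : Bool :=
  let t := PySem.Chars.strip cs
  if pvKeyMem enums t then true
  else if PySem.Chars.startswith t ['?'] then pvCoreA enums (PySem.List.slice t (some 1) none)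
  else if PySem.Chars.startswith t ['*'] then pvCoreA enums (PySem.List.slice t (some 1) none)
  else if PySem.Chars.startswith t "[]const ".toList then
    let inner := PySem.Chars.strip (PySem.List.slice t (some 8) none)
    if pvKeyMem enums inner then true
    else if PySem.Chars.startswith inner "u8".toList || pvPrims.any (fun s => s.toList == inner) then true
    else if PySem.Chars.startswith inner "[]const u8".toList || PySem.Chars.startswith inner "?[]const u8".toList then true
    else false
  else
    PySem.Chars.startswith t ['u'] || PySem.Chars.startswith t ['i'] || PySem.Chars.startswith t ['f'] ||
      pvLeaves.any (fun s => s.toList == t)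
termination_by cs.length
decreasing_by
  all_goals
    simp only [PySem.List.slice_from_one]
    rename_i hsw
    have h1 := pvStripLen cs
    have hne : PySem.Chars.strip cs ≠ [] := by
      intro hnil
      have hsw2 : PySem.Chars.startswith (PySem.Chars.strip cs) _ = true := hsw
      rw [hnil] at hsw2
      exact absurd hsw2 (by decide)
    have h2 := List.length_tail (l := PySem.Chars.strip cs)
    have h3 : 0 < (PySem.Chars.strip cs).length := List.length_pos_iff.mpr hne
    omega

def is_scalar_type (t : String) (enums : List (String × List String)) : Bool :=
  pvCoreA enums t.toList

-- ===== PORT B =====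
-- the straight-line classification tail after the loop
def pvClassifyB (enums : List (String × List String)) (t : List Char) : Bool :=
  if PySem.Chars.startswith t "[]const ".toList then
    let inner := PySem.Chars.strip (PySem.List.slice t (some 8) none)
    if pvKeyMem enums inner then true
    else if PySem.Chars.startswith inner "u8".toList || pvPrims.any (fun s => s.toList == inner) then true
    else if PySem.Chars.startswith inner "[]const u8".toList || PySem.Chars.startswith inner "?[]const u8".toList then true
    else false
  else
    PySem.Chars.startswith t ['u'] || PySem.Chars.startswith t ['i'] || PySem.Chars.startswith t ['f'] ||
      pvLeaves.any (fun s => s.toList == t)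

-- the 'while True' loop: t is the single mutable variable, already stripped on entry
def pvLoopB (enums : List (String × List String)) (t : List Char) : Bool :=
  if pvKeyMem enums t then true
  else if PySem.Chars.startswith t ['?'] || PySem.Chars.startswith t ['*'] then
    pvLoopB enums (PySem.Chars.strip (PySem.List.slice t (some 1) none))
  else pvClassifyB enums t
termination_by t.length
decreasing_by
  simp only [PySem.List.slice_from_one]
  have h1 := pvStripLen t.tail
  rename_i hsw
  have hne : t ≠ [] := by
    intro hnil; rw [hnil] at hsw; simp [PySem.Chars.startswith] at hsw
  have h2 : 0 < t.length := List.length_pos_iff.mpr hne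
  have h3 := List.length_tail (l := t)
  omega

def is_scalar_type_alt (t : String) (enums : List (String × List String)) : Bool :=
  pvLoopB enums (PySem.Chars.strip t.toList)

-- ===== PRECONDITION & SPEC =====
def Spec_is_scalar_type (t : String) (enums : List (String × List String)) (out : Bool) : Prop := out = is_scalar_type_alt t enums
instance (t : String) (enums : List (String × List String)) (out : Bool) : Decidable (Spec_is_scalar_type t enums out) := by unfold Spec_is_scalar_type; infer_instance

-- ===== CLAIM (what is proved, stated in full; the proofs are below) =====
def Claim_equal_is_scalar_type : Prop := ∀ (t : String) (enums : List (String × List String)), Dom_is_scalar_type t enums → Spec_is_scalar_type t enums (is_scalar_type t enums)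

-- ===== LEMMAS AND PROOFS =====
theorem pvCoreA_eq_loopB (enums : List (String × List String)) (n : Nat) :
    ∀ cs : List Char, cs.length ≤ n → pvCoreA enums cs = pvLoopB enums (PySem.Chars.strip cs) := by
  induction n with
  | zero =>
    intro cs h
    have hcs : cs = [] := List.length_eq_zero_iff.mp (Nat.le_zero.mp h)
    subst hcs
    rw [pvCoreA, pvLoopB]
    have hstrip : PySem.Chars.strip ([] : List Char) = [] := rfl
    simp [hstrip, pvClassifyB, PySem.Chars.startswith]
  | succ n ih =>
    intro cs h
    rw [pvCoreA, pvLoopB]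
    by_cases hm : pvKeyMem enums (PySem.Chars.strip cs)
    · simp [hm]
    · have hlen : ((PySem.Chars.strip cs).tail).length ≤ n := by
        have h1 := pvStripLen cs
        have h2 : (PySem.Chars.strip cs).tail.length ≤ (PySem.Chars.strip cs).length - 1 := by
          cases PySem.Chars.strip cs <;> simp
        omega
      by_cases hq : PySem.Chars.startswith (PySem.Chars.strip cs) ['?']
      · simp only [hm, hq, if_true, Bool.true_or]
        rw [ih _ (by simpa [PySem.List.slice_from_one] using hlen)]
      · by_cases hs : PySem.Chars.startswith (PySem.Chars.strip cs) ['*']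
        · simp only [hm, hq, hs, if_true, Bool.or_true]
          rw [ih _ (by simpa [PySem.List.slice_from_one] using hlen)]
          simp
        · simp [hm, hq, hs, pvClassifyB]

-- ===== VERDICT (by name: the statement is the Claim_ definition above) =====
theorem is_scalar_type_spec : Claim_equal_is_scalar_type := by
  intro t enums _
  unfold Spec_is_scalar_type is_scalar_type is_scalar_type_alt
  exact pvCoreA_eq_loopB enums t.toList.length t.toList le_rfl
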